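-- pv_equiv track=rewrite | github.com/RuslanSayfullin/Python3_PyQt5 | example/BestMeetingPoint.py | search
-- ===== SOURCE A (Python) =====
-- def search(grid: list[list[int]], row: int, col: int) -> int:
--     q = [(row, col, 0)]
--     m = len(grid)
--     n = len(grid[0])
--     visited = [[False] * n for _ in range(m)]
--     totalDistance = 0
--
--     while q:
--         r, c, d = q.pop(0)
--
--         if r < 0 or c < 0 or r >= m or c >= n or visited[r][c]:
--             continue
--
--         if grid[r][c] == 1:
--             totalDistance += d
--
--         visited[r][c] = True
--
--         q.append((r + 1, c, d + 1))
--         q.append((r - 1, c, d + 1))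
--         q.append((r, c + 1, d + 1))
--         q.append((r, c - 1, d + 1))
--
--     return totalDistance
-- ===== SOURCE B (Python) =====
-- def search(grid: list[list[int]], row: int, col: int) -> int:
--     # Without obstacles the BFS distance is the Manhattan distance, so just
--     # sum |r-row|+|c-col| over all 1-cells.  A start outside the grid reaches
--     # no cell, hence 0.
--     if not (0 <= row < len(grid) and 0 <= col < len(grid[0])):
--         return 0
--     return sum(abs(r - row) + abs(c - col)
--                for r, cells in enumerate(grid)
--                for c, v in enumerate(cells)
--                if v == 1)
-- ===== Notes on version B (the rewrite author's own statement) =====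
-- stated objective: simpler
-- what changed: Replaced the BFS with an explicit queue and visited matrix by a direct double loop summing the Manhattan distance |r-row|+|c-col| over all 1-cells (on an obstacle-free grid BFS distance = Manhattan distance).
-- outside the precondition, e.g. on search([[1], [1, 1]], 0, 0): A returns 1, B returns 3; on search([], 0, 0): A raises IndexError, B returns 0; on search([[1, 1], [1]], 0, 0): A raises IndexError, B returns 2
import Mathlib
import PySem

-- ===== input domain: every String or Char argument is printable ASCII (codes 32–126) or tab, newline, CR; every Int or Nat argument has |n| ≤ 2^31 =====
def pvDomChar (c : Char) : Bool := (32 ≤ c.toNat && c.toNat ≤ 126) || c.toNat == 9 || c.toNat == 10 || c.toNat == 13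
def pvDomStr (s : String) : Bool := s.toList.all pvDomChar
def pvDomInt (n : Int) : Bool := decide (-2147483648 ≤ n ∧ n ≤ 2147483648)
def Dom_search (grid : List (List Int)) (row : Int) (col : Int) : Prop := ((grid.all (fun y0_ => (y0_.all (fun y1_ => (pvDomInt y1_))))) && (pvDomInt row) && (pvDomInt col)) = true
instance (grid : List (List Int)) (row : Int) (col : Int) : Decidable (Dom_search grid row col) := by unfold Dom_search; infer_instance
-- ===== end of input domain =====

-- B replaces A's list-queue BFS by a direct double loop summing the Manhattan
-- distance |r-row|+|c-col| over all 1-cells (no obstacles, so the BFS distance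
-- is the Manhattan distance); objective: simpler.

-- ===== PORT A =====
-- visited[r][c] / grid[r][c]: A only reads/writes these after the bounds guard
-- (0 ≤ r < m, 0 ≤ c < n), where getD/toNat is exact Python indexing.
def vget (v : List (List Bool)) (r c : Int) : Bool :=
  (v.getD r.toNat []).getD c.toNat false

def vset (v : List (List Bool)) (r c : Int) : List (List Bool) :=
  v.set r.toNat ((v.getD r.toNat []).set c.toNat true)

def gget (g : List (List Int)) (r c : Int) : Int :=
  (g.getD r.toNat []).getD c.toNat 0

-- termination measure for the BFS loop: unmarked entries of `visited`
def falseCount (v : List (List Bool)) : Nat :=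
  (v.map (fun rw => rw.count false)).sum

-- The next four lemmas are cited by bfsLoop's decreasing_by / shape argument.
lemma count_false_set {l : List Bool} {c : Nat} (hc : c < l.length) (hf : l.getD c false = false) :
    (l.set c true).count false < l.count false := by
  induction l generalizing c with
  | nil => simp at hc
  | cons a l ih =>
    cases c with
    | zero => simp_all
    | succ c =>
      have := ih (by simpa using hc) (by simpa using hf)
      simp only [List.set, List.count_cons]
      split <;> omega

lemma sum_set_lt (l : List Nat) (i a : Nat) (h : i < l.length) (ha : a < l[i]) :
    (l.set i a).sum < l.sum := by
  rw [List.sum_set]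
  conv_rhs => rw [← List.take_append_drop i l]
  rw [List.sum_append, List.drop_eq_getElem_cons h, List.sum_cons, if_pos h]
  omega

lemma falseCount_vset {v : List (List Bool)} {r c : Int} {m n : Nat}
    (hlen : v.length = m ∧ ∀ rw ∈ v, rw.length = n)
    (hr : 0 ≤ r) (hrm : r < (m : Int)) (hc : 0 ≤ c) (hcn : c < (n : Int))
    (hun : vget v r c = false) :
    falseCount (vset v r c) < falseCount v := by
  obtain ⟨hl, hrows⟩ := hlen
  have hrlt : r.toNat < v.length := by omega
  have hrow : (v.getD r.toNat []) = v[r.toNat] := List.getD_eq_getElem _ _ hrlt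
  have hclt : c.toNat < (v[r.toNat]).length := by
    have := hrows _ (List.getElem_mem hrlt); omega
  unfold falseCount vset
  rw [hrow, List.map_set]
  apply sum_set_lt _ _ _ (by simpa using hrlt)
  rw [List.getElem_map]
  exact count_false_set hclt (by rw [← hrow]; simpa [vget] using hun)

lemma vset_shape {v : List (List Bool)} {r c : Int} {m n : Nat}
    (h : v.length = m ∧ ∀ rw ∈ v, rw.length = n) :
    (vset v r c).length = m ∧ ∀ rw ∈ vset v r c, rw.length = n := by
  obtain ⟨hl, hrows⟩ := h
  refine ⟨by simp [vset, hl], ?_⟩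
  intro rw hrw
  rcases Nat.lt_or_ge r.toNat v.length with hlt | hge
  · rcases List.mem_or_eq_of_mem_set hrw with h | h
    · exact hrows _ h
    · subst h
      rw [List.length_set, List.getD_eq_getElem _ _ hlt]
      exact hrows _ (List.getElem_mem hlt)
  · rw [vset, List.set_eq_of_length_le (by omega)] at hrw
    exact hrows _ hrw

-- A's while-loop, step for step (pop(0) = head; four appends; the shape
-- hypothesis on `visited` only justifies termination, it carries no data).
def bfsLoop (grid : List (List Int)) (m n : Nat) (q : List (Int × Int × Int))
    (visited : List (List Bool)) (total : Int)
    (hsh : visited.length = m ∧ ∀ rw ∈ visited, rw.length = n) : Int :=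
  match q with
  | [] => total
  | (r, c, d) :: q' =>
    if r < 0 ∨ c < 0 ∨ (m : Int) ≤ r ∨ (n : Int) ≤ c ∨ vget visited r c = true then
      bfsLoop grid m n q' visited total hsh
    else
      bfsLoop grid m n
        (q' ++ [(r + 1, c, d + 1), (r - 1, c, d + 1), (r, c + 1, d + 1), (r, c - 1, d + 1)])
        (vset visited r c)
        (if gget grid r c = 1 then total + d else total)
        (vset_shape hsh)
termination_by (falseCount visited, q.length)
decreasing_by
  · exact Prod.Lex.right _ (by simp)
  · rename_i h; push_neg at h
    exact Prod.Lex.left _ _ (falseCount_vset hsh (by omega) (by omega) (by omega) (by omega)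
      (by simpa using h.2.2.2.2))

-- m = len(grid); n = len(grid[0]) (Pre_ guarantees grid ≠ [], where headD is grid[0])
def search (grid : List (List Int)) (row : Int) (col : Int) : Int :=
  bfsLoop grid grid.length (grid.headD []).length [(row, col, 0)]
    (List.replicate grid.length (List.replicate (grid.headD []).length false)) 0
    ⟨by simp, fun rw h => by simp [List.eq_of_mem_replicate h]⟩

-- ===== PORT B =====
def search_alt (grid : List (List Int)) (row : Int) (col : Int) : Int :=
  if 0 ≤ row ∧ row < (grid.length : Int) ∧ 0 ≤ col ∧ col < ((grid.headD []).length : Int) then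
    ((PySem.List.enumerate grid 0).map (fun p =>
      (((PySem.List.enumerate p.2 0).filter (fun q => q.2 == 1)).map
        (fun q => |p.1 - row| + |q.1 - col|)).sum)).sum
  else 0

-- ===== PRECONDITION & SPEC =====
-- Pre_ excludes the empty grid (A raises IndexError at len(grid[0])) and, when
-- the start is inside the m x n frame, non-rectangular grids: the BFS then
-- raises IndexError on a row shorter than row 0, and silently never visits the
-- cells a longer row has beyond the first row's width.
def Pre_search (grid : List (List Int)) (row : Int) (col : Int) : Prop :=
  grid ≠ [] ∧ ((0 ≤ row ∧ row < (grid.length : Int) ∧ 0 ≤ col ∧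
    col < ((grid.headD []).length : Int)) →
      ∀ rw ∈ grid, rw.length = (grid.headD []).length)

instance (grid : List (List Int)) (row : Int) (col : Int) : Decidable (Pre_search grid row col) := by
  unfold Pre_search; infer_instance

def pvWitness_search : List (List Int) × Int × Int := ([[1, 0], [0, 1]], 0, 0)

def Spec_search (grid : List (List Int)) (row : Int) (col : Int) (out : Int) : Prop := out = search_alt grid row col
instance (grid : List (List Int)) (row : Int) (col : Int) (out : Int) : Decidable (Spec_search grid row col out) := by unfold Spec_search; infer_instance

-- ===== CLAIM (what is proved, stated in full; the proofs are below) =====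
def Claim_equal_search : Prop := ∀ (grid : List (List Int)) (row : Int) (col : Int), Dom_search grid row col → Pre_search grid row col → Spec_search grid row col (search grid row col)

-- ===== LEMMAS AND PROOFS =====

-- Manhattan distance of the cell (i,j) from the start
def mdN (row col : Int) (i j : Nat) : Int := |(i : Int) - row| + |(j : Int) - col|

-- the term a 1-cell contributes to B's sum
def contrib (grid : List (List Int)) (row col : Int) (p : Nat × Nat) : Int :=
  if (grid.getD p.1 []).getD p.2 0 = 1 then mdN row col p.1 p.2 else 0

def cells (m n : Nat) : List (Nat × Nat) := (List.range m) ×ˢ (List.range n)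

def restSum (grid : List (List Int)) (row col : Int) (m n k : Nat) : Int :=
  ((cells m n).map (fun p =>
    if (k : Int) ≤ mdN row col p.1 p.2 then contrib grid row col p else 0)).sum

def layerRem (grid : List (List Int)) (row col : Int) (m n k : Nat) (f : Nat → Nat → Bool) : Int :=
  ((cells m n).map (fun p =>
    if mdN row col p.1 p.2 = (k : Int) ∧ f p.1 p.2 = false then contrib grid row col p else 0)).sum

def Vis (m n : Nat) (f : Nat → Nat → Bool) : List (List Bool) :=
  (List.range m).map (fun i => (List.range n).map (fun j => f i j))

lemma Vis_shape (m n : Nat) (f : Nat → Nat → Bool) :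
    (Vis m n f).length = m ∧ ∀ rw ∈ Vis m n f, rw.length = n := by
  refine ⟨by simp [Vis], ?_⟩
  intro rw h
  simp only [Vis, List.mem_map, List.mem_range] at h
  obtain ⟨i, -, rfl⟩ := h
  simp

lemma mem_cells {m n : Nat} {p : Nat × Nat} : p ∈ cells m n ↔ p.1 < m ∧ p.2 < n := by
  obtain ⟨a, b⟩ := p
  simp [cells, SProd.sprod, List.pair_mem_product]

lemma cells_nodup (m n : Nat) : (cells m n).Nodup := by
  exact (List.nodup_range).product (List.nodup_range)

lemma sum_map_update {l : List (Nat × Nat)} (hnd : l.Nodup) {x : Nat × Nat} (hx : x ∈ l)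
    (g h : Nat × Nat → Int) (hgh : ∀ y ∈ l, y ≠ x → g y = h y) :
    (l.map g).sum = (l.map h).sum + (g x - h x) := by
  induction l with
  | nil => simp at hx
  | cons a l ih =>
    rcases List.nodup_cons.mp hnd with ⟨ha, hl⟩
    rcases List.mem_cons.mp hx with rfl | hx
    · have : l.map g = l.map h :=
        List.map_congr_left (fun y hy => hgh y (List.mem_cons_of_mem _ hy) (fun e => ha (e ▸ hy)))
      simp only [List.map_cons, List.sum_cons, this]; ring
    · have hax : a ≠ x := fun e => ha (e ▸ hx)
      have := ih hl hx (fun y hy hne => hgh y (List.mem_cons_of_mem _ hy) hne)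
      simp only [List.map_cons, List.sum_cons, this, hgh a (List.mem_cons_self) hax]; ring

lemma set_map_range {α : Type} (g : Nat → α) (m a : Nat) (x : α) (ha : a < m) :
    ((List.range m).map g).set a x = (List.range m).map (fun i => if i = a then x else g i) := by
  apply List.ext_getElem (by simp)
  intro i h1 h2
  simp only [List.getElem_set, List.getElem_map, List.getElem_range]
  split <;> [simp_all; (rw [if_neg]; omega)]

lemma vget_Vis {m n : Nat} {f : Nat → Nat → Bool} {r c : Int}
    (hr : 0 ≤ r) (hrm : r < (m : Int)) (hc : 0 ≤ c) (hcn : c < (n : Int)) :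
    vget (Vis m n f) r c = f r.toNat c.toNat := by
  have h1 : r.toNat < m := by omega
  have h2 : c.toNat < n := by omega
  have e1 : (Vis m n f).getD r.toNat [] = (List.range n).map (fun j => f r.toNat j) := by
    rw [List.getD_eq_getElem _ _ (by simpa [Vis] using h1)]
    simp [Vis]
  rw [vget, e1, List.getD_eq_getElem _ _ (by simpa using h2)]
  simp

lemma vset_Vis {m n : Nat} {f : Nat → Nat → Bool} {r c : Int}
    (hr : 0 ≤ r) (hrm : r < (m : Int)) (hc : 0 ≤ c) (hcn : c < (n : Int)) :
    vset (Vis m n f) r c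
      = Vis m n (fun i j => if i = r.toNat ∧ j = c.toNat then true else f i j) := by
  have h1 : r.toNat < m := by omega
  have h2 : c.toNat < n := by omega
  unfold vset Vis
  rw [List.getD_eq_getElem _ _ (by simpa using h1)]
  simp only [List.getElem_map, List.getElem_range]
  rw [set_map_range _ _ _ _ h2, set_map_range _ _ _ _ h1]
  apply List.map_congr_left
  intro i hi
  by_cases hir : i = r.toNat
  · subst hir
    simp only [if_pos rfl]
    apply List.map_congr_left
    intro j hj
    by_cases hjc : j = c.toNat <;> simp [hjc]
  · simp only [if_neg hir]
    apply List.map_congr_left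
    intro j hj
    simp [hir]

lemma replicate_eq_Vis (m n : Nat) :
    List.replicate m (List.replicate n false) = Vis m n (fun _ _ => false) := by
  apply List.ext_getElem (by simp [Vis])
  intro i h1 h2
  simp [Vis]

lemma sum_map_zero {l : List (Nat × Nat)} {g : Nat × Nat → Int} (h : ∀ p ∈ l, g p = 0) :
    (l.map g).sum = 0 := by
  rw [List.map_congr_left h]; simp

lemma mdN_nonneg (row col : Int) (i j : Nat) : 0 ≤ mdN row col i j := by
  unfold mdN; positivity

lemma layerRem_eq_zero {grid : List (List Int)} {row col : Int} {m n k : Nat} {f : Nat → Nat → Bool}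
    (hall : ∀ i j, i < m → j < n → mdN row col i j = (k : Int) → f i j = true) :
    layerRem grid row col m n k f = 0 := by
  apply sum_map_zero
  intro p hp
  rcases mem_cells.mp hp with ⟨h1, h2⟩
  rw [if_neg]
  rintro ⟨hmd, hf⟩
  rw [hall p.1 p.2 h1 h2 hmd] at hf
  cases hf

lemma restSum_eq_zero {grid : List (List Int)} {row col : Int} {m n k : Nat}
    (hall : ∀ i j, i < m → j < n → mdN row col i j < (k : Int)) :
    restSum grid row col m n k = 0 := by
  apply sum_map_zero
  intro p hp
  rcases mem_cells.mp hp with ⟨h1, h2⟩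
  rw [if_neg]
  have := hall p.1 p.2 h1 h2
  omega

lemma restSum_step {grid : List (List Int)} {row col : Int} {m n k : Nat} {f : Nat → Nat → Bool}
    (hf : ∀ i j, i < m → j < n → mdN row col i j = (k : Int) + 1 → f i j = false) :
    restSum grid row col m n (k + 1)
      = layerRem grid row col m n (k + 1) f + restSum grid row col m n (k + 2) := by
  unfold restSum layerRem
  rw [← PySem.List.sum_map_add_int]
  apply congrArg List.sum
  apply List.map_congr_left
  intro p hp
  rcases mem_cells.mp hp with ⟨h1, h2⟩
  have hk1 : ((k + 1 : Nat) : Int) = (k : Int) + 1 := by push_cast; ring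
  have hk2 : ((k + 2 : Nat) : Int) = (k : Int) + 2 := by push_cast; ring
  rw [hk1, hk2]
  by_cases hmd : mdN row col p.1 p.2 = (k : Int) + 1
  · rw [if_pos (by omega), if_pos ⟨hmd, hf p.1 p.2 h1 h2 hmd⟩, if_neg (by omega)]
    ring
  · by_cases hge : (k : Int) + 2 ≤ mdN row col p.1 p.2
    · rw [if_pos (by omega), if_neg (by tauto), if_pos hge]
      ring
    · rw [if_neg (by omega), if_neg (by tauto), if_neg hge]
      ring

lemma sum_start {grid : List (List Int)} {row col : Int} {m n : Nat} {f : Nat → Nat → Bool} :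
    layerRem grid row col m n 0 f + restSum grid row col m n 1
      = ((cells m n).map (contrib grid row col)).sum := by
  unfold restSum layerRem
  rw [← PySem.List.sum_map_add_int]
  apply congrArg List.sum
  apply List.map_congr_left
  intro p hp
  push_cast
  have h0 := mdN_nonneg row col p.1 p.2
  by_cases hmd : mdN row col p.1 p.2 = 0
  · have hc : contrib grid row col p = 0 := by
      unfold contrib; rw [hmd]; simp
    simp [hc, hmd]
  · rw [if_neg (fun h => hmd h.1), if_pos (by omega)]
    ring

-- every in-bounds cell at positive distance has an in-bounds neighbour one closer
lemma descend {row col : Int} {m n : Nat}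
    (hrow : 0 ≤ row) (hrowm : row < (m : Int)) (hcol : 0 ≤ col) (hcoln : col < (n : Int))
    {i j : Nat} (hi : i < m) (hj : j < n) (hpos : 0 < mdN row col i j) :
    ∃ a b : Nat, a < m ∧ b < n ∧ mdN row col a b = mdN row col i j - 1 ∧
      (((a : Int) + 1 = (i : Int) ∧ (b : Int) = (j : Int)) ∨
       ((a : Int) - 1 = (i : Int) ∧ (b : Int) = (j : Int)) ∨
       ((a : Int) = (i : Int) ∧ (b : Int) + 1 = (j : Int)) ∨
       ((a : Int) = (i : Int) ∧ (b : Int) - 1 = (j : Int))) := by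
  unfold mdN at hpos ⊢
  rcases lt_trichotomy row (i : Int) with hlt | heq | hgt
  · refine ⟨i - 1, j, by omega, hj, ?_, Or.inl ⟨by omega, rfl⟩⟩
    have c1 : (((i - 1 : Nat)) : Int) = (i : Int) - 1 := by omega
    rw [c1, abs_of_nonneg (a := (i : Int) - 1 - row) (by omega),
      abs_of_nonneg (a := (i : Int) - row) (by omega)]
    ring
  · rcases lt_trichotomy col (j : Int) with hlt2 | heq2 | hgt2
    · refine ⟨i, j - 1, hi, by omega, ?_, Or.inr (Or.inr (Or.inl ⟨rfl, by omega⟩))⟩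
      have c1 : (((j - 1 : Nat)) : Int) = (j : Int) - 1 := by omega
      rw [c1, abs_of_nonneg (a := (j : Int) - 1 - col) (by omega),
        abs_of_nonneg (a := (j : Int) - col) (by omega)]
      ring
    · exfalso
      rw [← heq, ← heq2] at hpos
      simp at hpos
    · refine ⟨i, j + 1, hi, by omega, ?_, Or.inr (Or.inr (Or.inr ⟨rfl, by omega⟩))⟩
      have c1 : (((j + 1 : Nat)) : Int) = (j : Int) + 1 := by omega
      rw [c1, abs_of_nonpos (a := (j : Int) + 1 - col) (by omega),
        abs_of_nonpos (a := (j : Int) - col) (by omega)]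
      ring
  · refine ⟨i + 1, j, by omega, hj, ?_, Or.inr (Or.inl ⟨by omega, rfl⟩)⟩
    have c1 : (((i + 1 : Nat)) : Int) = (i : Int) + 1 := by omega
    rw [c1, abs_of_nonpos (a := (i : Int) + 1 - row) (by omega),
      abs_of_nonpos (a := (i : Int) - row) (by omega)]
    ring

lemma noCellGe {row col : Int} {m n : Nat} {k : Nat}
    (hrow : 0 ≤ row) (hrowm : row < (m : Int)) (hcol : 0 ≤ col) (hcoln : col < (n : Int))
    (hnone : ∀ i j, i < m → j < n → mdN row col i j ≠ (k : Int)) :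
    ∀ i j, i < m → j < n → mdN row col i j < (k : Int) := by
  suffices H : ∀ v : Nat, ∀ i j : Nat, i < m → j < n → mdN row col i j = (v : Int) →
      (v : Int) < (k : Int) by
    intro i j hi hj
    have h0 : 0 ≤ mdN row col i j := by unfold mdN; positivity
    have := H (mdN row col i j).toNat i j hi hj (by omega)
    omega
  intro v
  induction v using Nat.strong_induction_on with
  | _ v ih =>
    intro i j hi hj hmd
    by_contra hge
    have hne := hnone i j hi hj
    have hpos : 0 < mdN row col i j := by omega
    obtain ⟨a, b, ha, hb, hab, -⟩ := descend hrow hrowm hcol hcoln hi hj hpos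
    have hv1 : mdN row col a b = ((v - 1 : Nat) : Int) := by omega
    have := ih (v - 1) (by omega) a b ha hb hv1
    omega

lemma bfsLoop_proof_irrel (grid : List (List Int)) (m n : Nat) (q : List (Int × Int × Int))
    {v v' : List (List Bool)} (t : Int) (e : v = v') (h1 : v.length = m ∧ ∀ rw ∈ v, rw.length = n)
    (h2 : v'.length = m ∧ ∀ rw ∈ v', rw.length = n) :
    bfsLoop grid m n q v t h1 = bfsLoop grid m n q v' t h2 := by
  subst e; rfl

theorem bfs_layers (grid : List (List Int)) (row col : Int) (m n : Nat)
    (hrow : 0 ≤ row) (hrowm : row < (m : Int)) (hcol : 0 ≤ col) (hcoln : col < (n : Int))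
    (k : Nat) (hk : k ≤ m + n + 1)
    (f : Nat → Nat → Bool) (Q1 Q2 : List (Int × Int × Int)) (T : Int)
    (hQ1 : ∀ e ∈ Q1, e.2.2 = (k : Int) ∧ |e.1 - row| + |e.2.1 - col| ≤ (k : Int))
    (hQ2 : ∀ e ∈ Q2, e.2.2 = (k : Int) + 1 ∧ |e.1 - row| + |e.2.1 - col| ≤ (k : Int) + 1)
    (hvlt : ∀ i j, i < m → j < n → mdN row col i j < (k : Int) → f i j = true)
    (hvle : ∀ i j, f i j = true → i < m ∧ j < n ∧ mdN row col i j ≤ (k : Int))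
    (hcov1 : ∀ i j, i < m → j < n → mdN row col i j = (k : Int) → f i j = false →
        ((i : Int), (j : Int), (k : Int)) ∈ Q1)
    (hcov2 : ∀ i j, i < m → j < n → mdN row col i j = (k : Int) → f i j = true →
        ((i : Int) + 1, (j : Int), (k : Int) + 1) ∈ Q2 ∧
        ((i : Int) - 1, (j : Int), (k : Int) + 1) ∈ Q2 ∧
        ((i : Int), (j : Int) + 1, (k : Int) + 1) ∈ Q2 ∧
        ((i : Int), (j : Int) - 1, (k : Int) + 1) ∈ Q2)
    (hsrc : Q2 = [] ∨ ∃ i j, i < m ∧ j < n ∧ mdN row col i j = (k : Int))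
    (hsh : (Vis m n f).length = m ∧ ∀ rw ∈ Vis m n f, rw.length = n)
    (L : Nat) (hL : Q1.length = L) :
    bfsLoop grid m n (Q1 ++ Q2) (Vis m n f) T hsh
      = T + layerRem grid row col m n k f + restSum grid row col m n (k + 1) := by
  cases Q1 with
  | nil =>
    cases Q2 with
    | nil =>
      have hall : ∀ i j, i < m → j < n → mdN row col i j ≠ (k : Int) := by
        intro i j hi hj hmd
        by_cases hf : f i j = true
        · exact absurd (hcov2 i j hi hj hmd hf).1 (by simp)
        · exact absurd (hcov1 i j hi hj hmd (by simpa using hf)) (by simp)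
      have hlt := noCellGe hrow hrowm hcol hcoln hall
      rw [List.append_nil, bfsLoop]
      rw [layerRem_eq_zero (fun i j hi hj hmd => absurd hmd (hall i j hi hj)),
        restSum_eq_zero (fun i j hi hj => by push_cast; have := hlt i j hi hj; omega)]
      ring
    | cons e Q2' =>
      have hLk : ∀ i j, i < m → j < n → mdN row col i j = (k : Int) → f i j = true := by
        intro i j hi hj hmd
        by_contra hf
        exact absurd (hcov1 i j hi hj hmd (by simpa using hf)) (by simp)
      obtain ⟨i0, j0, hi0, hj0, hmd0⟩ := hsrc.resolve_left (by simp)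
      have hkb : k + 1 ≤ m + n + 1 := by
        unfold mdN at hmd0
        rcases abs_cases ((i0 : Int) - row) with ⟨e1, -⟩ | ⟨e1, -⟩ <;>
          rcases abs_cases ((j0 : Int) - col) with ⟨e2, -⟩ | ⟨e2, -⟩ <;> omega
      have hrec := bfs_layers grid row col m n hrow hrowm hcol hcoln (k + 1) hkb f
        (e :: Q2') [] T
        (by intro e' he'; have := hQ2 e' he'; push_cast; exact this)
        (by intro e' he'; simp at he')
        (by intro i j hi hj hmd
            push_cast at hmd
            by_cases hc : mdN row col i j < (k : Int)
            · exact hvlt i j hi hj hc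
            · exact hLk i j hi hj (by omega))
        (by intro i j hf
            obtain ⟨h1, h2, h3⟩ := hvle i j hf
            exact ⟨h1, h2, by push_cast; omega⟩)
        (by intro i j hi hj hmd hf0
            push_cast at hmd
            obtain ⟨a, b, ha, hb, hab, hnb⟩ := descend hrow hrowm hcol hcoln hi hj (by omega)
            have hmdab : mdN row col a b = (k : Int) := by omega
            obtain ⟨m1, m2, m3, m4⟩ := hcov2 a b ha hb hmdab (hLk a b ha hb hmdab)
            push_cast
            rcases hnb with ⟨e1, e2⟩ | ⟨e1, e2⟩ | ⟨e1, e2⟩ | ⟨e1, e2⟩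
            · rw [show ((i : Int), (j : Int), (k : Int) + 1)
                  = ((a : Int) + 1, (b : Int), (k : Int) + 1) by rw [e1, e2]]
              exact m1
            · rw [show ((i : Int), (j : Int), (k : Int) + 1)
                  = ((a : Int) - 1, (b : Int), (k : Int) + 1) by rw [e1, e2]]
              exact m2
            · rw [show ((i : Int), (j : Int), (k : Int) + 1)
                  = ((a : Int), (b : Int) + 1, (k : Int) + 1) by rw [e1, e2]]
              exact m3
            · rw [show ((i : Int), (j : Int), (k : Int) + 1)
                  = ((a : Int), (b : Int) - 1, (k : Int) + 1) by rw [e1, e2]]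
              exact m4)
        (by intro i j hi hj hmd hf0
            obtain ⟨-, -, h3⟩ := hvle i j hf0
            push_cast at hmd
            omega)
        (Or.inl rfl)
        hsh (e :: Q2').length rfl
      have hst : restSum grid row col m n (k + 1)
          = layerRem grid row col m n (k + 1) f + restSum grid row col m n (k + 2) :=
        restSum_step (f := f) (by
          intro i j hi hj hmd
          by_contra hf0
          obtain ⟨-, -, h3⟩ := hvle i j (by simpa using hf0)
          omega)
      rw [List.nil_append, ← List.append_nil (e :: Q2'), hrec, layerRem_eq_zero hLk]
      conv_rhs => rw [hst]
      simp only [show k + 1 + 1 = k + 2 from rfl]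
      ring
  | cons e Q1' =>
    obtain ⟨r, c, d⟩ := e
    obtain ⟨hd0, hmde0⟩ := hQ1 (r, c, d) List.mem_cons_self
    have hd : d = (k : Int) := hd0
    have hmde : |r - row| + |c - col| ≤ (k : Int) := hmde0
    rw [List.cons_append, bfsLoop]
    by_cases hg : r < 0 ∨ c < 0 ∨ (m : Int) ≤ r ∨ (n : Int) ≤ c ∨ vget (Vis m n f) r c = true
    · rw [if_pos hg]
      refine bfs_layers grid row col m n hrow hrowm hcol hcoln k hk f Q1' Q2 T
        (fun e' he' => hQ1 e' (List.mem_cons_of_mem _ he')) hQ2 hvlt hvle ?_ hcov2 hsrc hsh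
        Q1'.length rfl
      intro i j hi hj hmd hf0
      rcases List.mem_cons.mp (hcov1 i j hi hj hmd hf0) with heq | hmem
      · exfalso
        rw [Prod.mk.injEq, Prod.mk.injEq] at heq
        obtain ⟨h1, h2, h3⟩ := heq
        rcases hg with h | h | h | h | h
        · omega
        · omega
        · omega
        · omega
        · rw [vget_Vis (by omega) (by omega) (by omega) (by omega)] at h
          have er : r.toNat = i := by omega
          have ec : c.toNat = j := by omega
          rw [er, ec, hf0] at h
          cases h
      · exact hmem
    · rw [if_neg hg]
      have hr0 : 0 ≤ r := by omega
      have hc0 : 0 ≤ c := by omega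
      have hrm' : r < (m : Int) := by omega
      have hcn' : c < (n : Int) := by omega
      have hfv : f r.toNat c.toNat = false := by
        have hv := vget_Vis (f := f) hr0 hrm' hc0 hcn'
        by_contra hft
        exact hg (Or.inr (Or.inr (Or.inr (Or.inr (by rw [hv]; simpa using hft)))))
      have er : ((r.toNat : Nat) : Int) = r := Int.toNat_of_nonneg hr0
      have ec : ((c.toNat : Nat) : Int) = c := Int.toNat_of_nonneg hc0
      have hmdle : mdN row col r.toNat c.toNat ≤ (k : Int) := by
        unfold mdN; rw [er, ec]; exact hmde
      have hmdeq : mdN row col r.toNat c.toNat = (k : Int) := by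
        by_contra hne
        have := hvlt r.toNat c.toNat (by omega) (by omega) (by omega)
        rw [this] at hfv; cases hfv
      set f' := fun i j => if i = r.toNat ∧ j = c.toNat then true else f i j with hf'
      have hvis : vset (Vis m n f) r c = Vis m n f' := by
        rw [vset_Vis hr0 hrm' hc0 hcn', hf']
      rw [List.append_assoc,
        bfsLoop_proof_irrel grid m n _ _ hvis _ (Vis_shape m n f')]
      have hrec := bfs_layers grid row col m n hrow hrowm hcol hcoln k hk f' Q1'
        (Q2 ++ [(r + 1, c, d + 1), (r - 1, c, d + 1), (r, c + 1, d + 1), (r, c - 1, d + 1)])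
        (if gget grid r c = 1 then T + d else T)
        (fun e' he' => hQ1 e' (List.mem_cons_of_mem _ he'))
        (by intro e' he'
            rcases List.mem_append.mp he' with hl | hr'
            · exact hQ2 e' hl
            · have habs1 := abs_add_le (r - row) (1 : Int)
              have habs2 := abs_add_le (r - row) (-1 : Int)
              have habs3 := abs_add_le (c - col) (1 : Int)
              have habs4 := abs_add_le (c - col) (-1 : Int)
              simp only [List.mem_cons, List.not_mem_nil, or_false] at hr'
              rcases hr' with rfl | rfl | rfl | rfl <;>
                refine ⟨by rw [hd], ?_⟩ <;> simp only
              · rw [show r + 1 - row = r - row + 1 by ring]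
                simp only [abs_one] at habs1; omega
              · rw [show r - 1 - row = r - row + (-1) by ring]
                simp only [abs_neg, abs_one] at habs2; omega
              · rw [show c + 1 - col = c - col + 1 by ring]
                simp only [abs_one] at habs3; omega
              · rw [show c - 1 - col = c - col + (-1) by ring]
                simp only [abs_neg, abs_one] at habs4; omega)
        (by intro i j hi hj hlt
            rw [hf']
            simp only
            split
            · rfl
            · exact hvlt i j hi hj hlt)
        (by intro i j hft
            rw [hf'] at hft
            simp only at hft
            by_cases he : i = r.toNat ∧ j = c.toNat
            · obtain ⟨rfl, rfl⟩ := he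
              exact ⟨by omega, by omega, le_of_eq hmdeq⟩
            · rw [if_neg he] at hft
              exact hvle i j hft)
        (by intro i j hi hj hmd hf0
            rw [hf'] at hf0
            simp only at hf0
            by_cases he : i = r.toNat ∧ j = c.toNat
            · rw [if_pos he] at hf0; cases hf0
            · rw [if_neg he] at hf0
              rcases List.mem_cons.mp (hcov1 i j hi hj hmd hf0) with heq | hmem
              · exfalso
                rw [Prod.mk.injEq, Prod.mk.injEq] at heq
                exact he ⟨by omega, by omega⟩
              · exact hmem)
        (by intro i j hi hj hmd hft
            rw [hf'] at hft
            simp only at hft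
            by_cases he : i = r.toNat ∧ j = c.toNat
            · obtain ⟨rfl, rfl⟩ := he
              refine ⟨?_, ?_, ?_, ?_⟩ <;> refine List.mem_append_right _ ?_ <;>
                rw [er, ec, ← hd] <;> simp
            · rw [if_neg he] at hft
              obtain ⟨m1, m2, m3, m4⟩ := hcov2 i j hi hj hmd hft
              exact ⟨List.mem_append_left _ m1, List.mem_append_left _ m2,
                List.mem_append_left _ m3, List.mem_append_left _ m4⟩)
        (Or.inr ⟨r.toNat, c.toNat, by omega, by omega, hmdeq⟩)
        (Vis_shape m n f') Q1'.length rfl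
      rw [hrec]
      have hupd := sum_map_update (cells_nodup m n)
        (x := (r.toNat, c.toNat)) (mem_cells.mpr ⟨by omega, by omega⟩)
        (fun p => if mdN row col p.1 p.2 = (k : Int) ∧ f p.1 p.2 = false
          then contrib grid row col p else 0)
        (fun p => if mdN row col p.1 p.2 = (k : Int) ∧ f' p.1 p.2 = false
          then contrib grid row col p else 0)
        (by intro y hy hne
            dsimp only
            have hfy : f' y.1 y.2 = f y.1 y.2 := by
              show (if y.1 = r.toNat ∧ y.2 = c.toNat then true else f y.1 y.2) = f y.1 y.2
              rw [if_neg]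
              intro hc'
              exact hne (Prod.ext hc'.1 hc'.2)
            rw [hfy])
      have hgx : (if mdN row col r.toNat c.toNat = (k : Int) ∧ f r.toNat c.toNat = false
          then contrib grid row col (r.toNat, c.toNat) else 0)
          = (if gget grid r c = 1 then (k : Int) else 0) := by
        rw [if_pos ⟨hmdeq, hfv⟩]
        show (if (grid.getD r.toNat []).getD c.toNat 0 = 1
          then mdN row col r.toNat c.toNat else 0) = _
        rw [hmdeq]
        rfl
      have hhx : (if mdN row col r.toNat c.toNat = (k : Int) ∧ f' r.toNat c.toNat = false
          then contrib grid row col (r.toNat, c.toNat) else 0) = 0 := by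
        rw [if_neg]
        rintro ⟨-, hf0⟩
        rw [hf'] at hf0
        simp at hf0
      have hlay : layerRem grid row col m n k f
          = layerRem grid row col m n k f'
            + ((if gget grid r c = 1 then (k : Int) else 0) - 0) := by
        unfold layerRem
        rw [hupd]
        dsimp only
        rw [hgx, hhx]
      rw [hlay, hd]
      split <;> ring
termination_by (m + n + 2 - k, L)
decreasing_by
  · exact Prod.Lex.left _ _ (by omega)
  · simp only [List.length_cons] at hL
    exact Prod.Lex.right _ (by omega)
  · simp only [List.length_cons] at hL
    exact Prod.Lex.right _ (by omega)

lemma sum_filter_ite {α : Type} (l : List α) (p : α → Bool) (h : α → Int) :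
    ((l.filter p).map h).sum = (l.map fun x => if p x then h x else 0).sum := by
  induction l with
  | nil => simp
  | cons a l ih => by_cases hp : p a <;> simp [List.filter_cons, hp, ih]

lemma sum_product (g : Nat × Nat → Int) (m n : Nat) :
    ((cells m n).map g).sum
      = ((List.range m).map (fun i => ((List.range n).map (fun j => g (i, j))).sum)).sum := by
  unfold cells
  induction List.range m with
  | nil => rfl
  | cons a l1 ih =>
    rw [List.product_cons, List.map_append, List.sum_append, List.map_map, List.map_cons,
      List.sum_cons, ih]
    rfl

lemma enumerate_expand {α : Type} (xs : List α) (d : α) :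
    PySem.List.enumerate xs 0
      = (List.range xs.length).map (fun (k : Nat) => ((k : Int), xs.getD k d)) := by
  rw [PySem.List.enumerate_eq_map_pyRange xs d, PySem.List.len_eq,
    PySem.List.pyRange_zero_natCast, List.map_map]
  apply List.map_congr_left
  intro k hk
  simp [PySem.List.pyGetD_natCast]

lemma inner_eq (cs : List Int) (ri row col : Int) :
    (((PySem.List.enumerate cs 0).filter (fun q => q.2 == 1)).map
        (fun q => |ri - row| + |q.1 - col|)).sum
      = ((List.range cs.length).map
          (fun j => if cs.getD j 0 = 1 then |ri - row| + |(j : Int) - col| else 0)).sum := by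
  rw [enumerate_expand cs 0, List.filter_map, List.map_map, sum_filter_ite]
  apply congrArg List.sum
  apply List.map_congr_left
  intro j hj
  simp [beq_iff_eq]

lemma alt_eq (grid : List (List Int)) (row col : Int)
    (hin : 0 ≤ row ∧ row < (grid.length : Int) ∧ 0 ≤ col ∧ col < ((grid.headD []).length : Int))
    (hrect : ∀ rw ∈ grid, rw.length = (grid.headD []).length) :
    search_alt grid row col
      = ((cells grid.length (grid.headD []).length).map (contrib grid row col)).sum := by
  rw [search_alt, if_pos hin, sum_product, enumerate_expand grid [], List.map_map]
  apply congrArg List.sum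
  apply List.map_congr_left
  intro i hi
  have hil : i < grid.length := List.mem_range.mp hi
  have hlen : (grid.getD i []).length = (grid.headD []).length := by
    rw [List.getD_eq_getElem _ _ hil]
    exact hrect _ (List.getElem_mem hil)
  show (((PySem.List.enumerate (grid.getD i []) 0).filter _).map _).sum = _
  rw [inner_eq (grid.getD i []) (i : Int) row col, hlen]
  apply congrArg List.sum
  apply List.map_congr_left
  intro j hj
  rfl

-- ===== VERDICT (by name: the statement is the Claim_ definition above) =====
theorem search_spec : Claim_equal_search := by
  intro grid row col hdom hpre
  obtain ⟨hne, hcond⟩ := hpre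
  unfold Spec_search search
  by_cases hin : 0 ≤ row ∧ row < (grid.length : Int) ∧ 0 ≤ col ∧
      col < ((grid.headD []).length : Int)
  · have hrect := hcond hin
    obtain ⟨h1, h2, h3, h4⟩ := hin
    rw [bfsLoop_proof_irrel grid grid.length (grid.headD []).length _ 0
      (replicate_eq_Vis grid.length (grid.headD []).length)
      _ (Vis_shape _ _ (fun _ _ => false))]
    have hb := bfs_layers grid row col grid.length (grid.headD []).length h1 h2 h3 h4
      0 (by omega) (fun _ _ => false) [(row, col, 0)] [] 0
      (by intro e he
          simp only [List.mem_singleton] at he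
          subst he
          refine ⟨by simp, ?_⟩
          simp)
      (by intro e he; simp at he)
      (by intro i j _ _ hmd
          exfalso
          have := mdN_nonneg row col i j
          push_cast at hmd
          omega)
      (by intro i j h; simp at h)
      (by intro i j hi hj hmd _
          push_cast at hmd
          unfold mdN at hmd
          have ei : (i : Int) = row ∧ (j : Int) = col := by
            rcases abs_cases ((i : Int) - row) with ⟨e1, s1⟩ | ⟨e1, s1⟩ <;>
              rcases abs_cases ((j : Int) - col) with ⟨e2, s2⟩ | ⟨e2, s2⟩ <;>
                exact ⟨by omega, by omega⟩
          obtain ⟨ei, ej⟩ := ei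
          push_cast
          simp [ei, ej])
      (by intro i j _ _ _ h; simp at h)
      (Or.inl rfl)
      (Vis_shape _ _ _) 1 rfl
    rw [List.append_nil] at hb
    rw [hb, alt_eq grid row col ⟨h1, h2, h3, h4⟩ hrect,
      ← sum_start (f := fun _ _ => false)]
    simp only [Nat.zero_add]
    ring
  · have hdis : row < 0 ∨ col < 0 ∨ (grid.length : Int) ≤ row ∨
        ((grid.headD []).length : Int) ≤ col := by omega
    rw [bfsLoop, if_pos (by tauto), bfsLoop, search_alt, if_neg hin]
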